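-- pv_equiv track=rewrite | github.com/dplocki/aquaQ-challenge | solutions/challenge38.py | find_streak
-- ===== SOURCE A (Python) =====
-- from typing import Generator, Iterator, List
--
-- def find_streak(numbers: List[int], index: int, current_streak_length: int) -> bool:
--     for start in range(index - current_streak_length + 1, index + 1):
--         if start < 0 or start + current_streak_length > len(numbers):
--             continue
--
--         if (
--             sum(numbers[start + i] for i in range(current_streak_length))
--             % current_streak_length
--             == 0
--         ):
--             return True
--
--     return False
-- ===== SOURCE B (Python) =====
-- from typing import List
--
-- def find_streak(numbers: List[int], index: int, current_streak_length: int) -> bool: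
--     n = len(numbers)
--     lo = max(0, index - current_streak_length + 1)
--     hi = min(index, n - current_streak_length)
--     if lo > hi:
--         return False
--     s = sum(numbers[lo:lo + current_streak_length])
--     if s % current_streak_length == 0:
--         return True
--     for start in range(lo + 1, hi + 1):
--         s += numbers[start + current_streak_length - 1] - numbers[start - 1]
--         if s % current_streak_length == 0:
--             return True
--     return False
-- ===== Notes on version B (the rewrite author's own statement) =====
-- stated objective: alternative
-- what changed: B clamps the candidate start range to its valid part once, computes the first window sum from a slice, and slides that one running sum across the range (add entering element, subtract leaving one), instead of A scanning all candidate starts, filtering invalid ones, and re-summing every window from scratch.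
import Mathlib
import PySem

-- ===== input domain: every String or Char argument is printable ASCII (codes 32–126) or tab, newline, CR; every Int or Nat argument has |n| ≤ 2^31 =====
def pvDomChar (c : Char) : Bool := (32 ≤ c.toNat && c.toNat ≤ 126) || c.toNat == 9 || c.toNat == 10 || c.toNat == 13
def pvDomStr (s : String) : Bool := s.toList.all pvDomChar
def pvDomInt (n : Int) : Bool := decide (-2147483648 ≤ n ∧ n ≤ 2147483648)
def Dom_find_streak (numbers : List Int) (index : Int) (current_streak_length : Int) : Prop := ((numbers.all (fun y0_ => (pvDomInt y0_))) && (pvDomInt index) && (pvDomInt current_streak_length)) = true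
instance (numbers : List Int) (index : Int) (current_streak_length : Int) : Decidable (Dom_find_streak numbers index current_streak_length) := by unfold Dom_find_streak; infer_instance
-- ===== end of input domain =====

-- B clamps the start range to its valid part and slides one running window sum across it instead of re-summing each window like A.

-- ===== PORT A =====
-- sum(numbers[start + i] for i in range(current_streak_length)); indices are in range whenever A reaches this sum
def pvWinSum (numbers : List Int) (start L : Int) : Int :=
  ((PySem.List.pyRange 0 L 1).map (fun i => PySem.List.pyGetD numbers (start + i) 0)).sum

def find_streak (numbers : List Int) (index : Int) (current_streak_length : Int) : Bool :=
  (PySem.List.pyRange (index - current_streak_length + 1) (index + 1) 1).any (fun start =>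
    (!(decide (start < 0) || decide (start + current_streak_length > (numbers.length : Int)))) &&
      (PySem.Int.mod (pvWinSum numbers start current_streak_length) current_streak_length == 0))

-- ===== PORT B =====
-- the "for start in range(lo+1, hi+1)" loop of B, carrying the running window sum s
def pvAltLoop (numbers : List Int) (L : Int) : List Int → Int → Bool
  | [], _ => false
  | start :: rest, s =>
    let s' := s + PySem.List.pyGetD numbers (start + L - 1) 0 - PySem.List.pyGetD numbers (start - 1) 0
    if PySem.Int.mod s' L == 0 then true else pvAltLoop numbers L rest s'

def find_streak_alt (numbers : List Int) (index : Int) (current_streak_length : Int) : Bool :=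
  let n : Int := numbers.length
  let lo := max 0 (index - current_streak_length + 1)
  let hi := min index (n - current_streak_length)
  if lo > hi then false
  else
    let s := (PySem.List.slice numbers (some lo) (some (lo + current_streak_length))).sum
    if PySem.Int.mod s current_streak_length == 0 then true
    else pvAltLoop numbers current_streak_length (PySem.List.pyRange (lo + 1) (hi + 1) 1) s

-- ===== PRECONDITION & SPEC =====
def Spec_find_streak (numbers : List Int) (index : Int) (current_streak_length : Int) (out : Bool) : Prop := out = find_streak_alt numbers index current_streak_length
instance (numbers : List Int) (index : Int) (current_streak_length : Int) (out : Bool) : Decidable (Spec_find_streak numbers index current_streak_length out) := by unfold Spec_find_streak; infer_instance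

-- ===== CLAIM (what is proved, stated in full; the proofs are below) =====
def Claim_equal_find_streak : Prop := ∀ (numbers : List Int) (index : Int) (current_streak_length : Int), Dom_find_streak numbers index current_streak_length → Spec_find_streak numbers index current_streak_length (find_streak numbers index current_streak_length)

-- ===== LEMMAS AND PROOFS =====

-- A's window sum as a sum over the index range [a, a+L)
lemma winSum_eq_rangeSum (numbers : List Int) (a L : Int) :
    pvWinSum numbers a L =
      ((PySem.List.pyRange a (a + L) 1).map (fun j => PySem.List.pyGetD numbers j 0)).sum := by
  unfold pvWinSum
  rw [PySem.List.pyRange_one, PySem.List.pyRange_one]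
  simp [List.map_map, Function.comp_def]

-- sliding-window shift identity
lemma winSum_shift (numbers : List Int) (a L : Int) (hL : 0 < L) :
    pvWinSum numbers a L =
      pvWinSum numbers (a - 1) L + PySem.List.pyGetD numbers (a + L - 1) 0
        - PySem.List.pyGetD numbers (a - 1) 0 := by
  rw [winSum_eq_rangeSum, winSum_eq_rangeSum]
  rw [show a - 1 + L = a + L - 1 by ring]
  rw [PySem.List.pyRange_one_cons (by omega : a - 1 < a + L - 1)]
  rw [show a + L = (a + L - 1) + 1 by ring,
      PySem.List.pyRange_one_succ_right (by omega : a ≤ a + L - 1)]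
  rw [show a - 1 + 1 = a by ring]
  simp [List.sum_append]
  ring

-- B's loop answers "does some window starting in the range have sum divisible by L"
lemma altLoop_any (numbers : List Int) (L : Int) (hL : 0 < L) :
    ∀ (k : Nat) (a s : Int), s = pvWinSum numbers (a - 1) L →
      pvAltLoop numbers L (PySem.List.pyRange a (a + (k : Int)) 1) s =
        (PySem.List.pyRange a (a + (k : Int)) 1).any
          (fun start => PySem.Int.mod (pvWinSum numbers start L) L == 0) := by
  intro k
  induction k with
  | zero => intro a s hs; simp [pvAltLoop]
  | succ m ih =>
    intro a s hs
    rw [PySem.List.pyRange_one_cons (by push_cast; omega : a < a + ((m+1 : Nat) : Int))]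
    have hs' : s + PySem.List.pyGetD numbers (a + L - 1) 0 - PySem.List.pyGetD numbers (a - 1) 0
        = pvWinSum numbers a L := by rw [hs, ← winSum_shift numbers a L hL]
    have hrest : a + ((m+1 : Nat) : Int) = (a + 1) + (m : Int) := by push_cast; ring
    simp only [pvAltLoop, hs', List.any_cons]
    split
    · next h => simp [h]
    · next h =>
      rw [hrest, ih (a+1) (pvWinSum numbers a L) (by rw [show a + 1 - 1 = a by ring])]
      simp [h]

-- B's initial slice sum is the first window sum
lemma slice_sum_eq_winSum (numbers : List Int) (a L : Int) (ha : 0 ≤ a) (hL : 0 ≤ L)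
    (hn : a + L ≤ (numbers.length : Int)) :
    (PySem.List.slice numbers (some a) (some (a + L))).sum = pvWinSum numbers a L := by
  obtain ⟨j, rfl⟩ : ∃ j : Nat, a = (j : Int) := ⟨a.toNat, (Int.toNat_of_nonneg ha).symm⟩
  obtain ⟨k, rfl⟩ : ∃ k : Nat, L = (k : Int) := ⟨L.toNat, (Int.toNat_of_nonneg hL).symm⟩
  rw [PySem.List.slice_natCast_add]
  have hdrop : (PySem.List.pyRange (j : Int) ((numbers.length : Int)) 1).map
      (fun i => PySem.List.pyGetD numbers i 0) = numbers.drop j := by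
    have h := PySem.List.map_pyGetD_pyRange' numbers 0 (by positivity : (0:Int) ≤ (j:Int))
    simpa using h
  have hsplit : PySem.List.pyRange (j : Int) (numbers.length : Int) 1 =
      PySem.List.pyRange (j : Int) ((j : Int) + (k : Int)) 1 ++
      PySem.List.pyRange ((j : Int) + (k : Int)) (numbers.length : Int) 1 :=
    PySem.List.pyRange_one_append _ _ _ (by omega) (by omega)
  rw [hsplit, List.map_append] at hdrop
  have hlen : ((PySem.List.pyRange (j : Int) ((j : Int) + (k : Int)) 1).map
      (fun i => PySem.List.pyGetD numbers i 0)).length = k := by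
    simp [PySem.List.length_pyRange_one]
  have htake := congrArg (List.take k) hdrop
  rw [List.take_left' hlen] at htake
  rw [← htake, winSum_eq_rangeSum]

-- the common form: both programs answer "some valid window start in [lo, hi] works"
lemma A_eq_mid (numbers : List Int) (index L : Int) :
    find_streak numbers index L =
      (PySem.List.pyRange (max 0 (index - L + 1)) (min index ((numbers.length : Int) - L) + 1) 1).any
        (fun start => PySem.Int.mod (pvWinSum numbers start L) L == 0) := by
  rw [Bool.eq_iff_iff]
  unfold find_streak
  simp only [List.any_eq_true, PySem.List.mem_pyRange_one, Bool.and_eq_true, Bool.not_eq_true',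
    Bool.or_eq_false_iff, decide_eq_false_iff_not, not_lt, beq_iff_eq]
  constructor
  · rintro ⟨s, ⟨h1, h2⟩, ⟨h3, h4⟩, h5⟩
    exact ⟨s, ⟨by omega, by omega⟩, h5⟩
  · rintro ⟨s, ⟨h1, h2⟩, h5⟩
    exact ⟨s, ⟨by omega, by omega⟩, ⟨by omega, by omega⟩, h5⟩

lemma B_eq_mid (numbers : List Int) (index L : Int) :
    find_streak_alt numbers index L =
      (PySem.List.pyRange (max 0 (index - L + 1)) (min index ((numbers.length : Int) - L) + 1) 1).any
        (fun start => PySem.Int.mod (pvWinSum numbers start L) L == 0) := by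
  unfold find_streak_alt
  set lo := max 0 (index - L + 1) with hlo
  set hi := min index ((numbers.length : Int) - L) with hhi
  by_cases hgt : lo > hi
  · rw [if_pos hgt, PySem.List.pyRange_one_eq_nil (by omega : hi + 1 ≤ lo)]
    simp
  · push Not at hgt
    have hLpos : 0 < L := by omega
    rw [if_neg (by omega)]
    rw [slice_sum_eq_winSum numbers lo L (by omega) (by omega) (by omega)]
    have hk : hi + 1 = (lo + 1) + (((hi - lo).toNat : Int)) := by omega
    rw [PySem.List.pyRange_one_cons (by omega : lo < hi + 1), List.any_cons]
    show (if (PySem.Int.mod (pvWinSum numbers lo L) L == 0) = true then true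
      else pvAltLoop numbers L (PySem.List.pyRange (lo + 1) (hi + 1) 1) (pvWinSum numbers lo L)) = _
    split
    · next h => simp [h]
    · next h =>
      rw [hk, altLoop_any numbers L hLpos (hi - lo).toNat (lo + 1) _
        (by rw [show lo + 1 - 1 = lo by ring])]
      simp [h]

-- ===== VERDICT (by name: the statement is the Claim_ definition above) =====
theorem find_streak_spec : Claim_equal_find_streak := by
  intro numbers index L _
  unfold Spec_find_streak
  rw [A_eq_mid, B_eq_mid]
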